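-- pv_equiv track=rewrite | github.com/bbglab/adventofcode | 2017/iker/day11.py | reduce
-- ===== SOURCE A (Python) =====
-- from collections import Counter, defaultdict
--
-- oppossites = {'n': 's', 'ne': 'sw', 'nw': 'se'}
--
-- def reduce(moves):
--     counts = Counter(moves)
--     reduced = defaultdict(int)
--     for k, v in oppossites.items():
--         value = counts[k] - counts[v]
--         if value > 0:
--             reduced[k] = value
--     return reduced
-- ===== SOURCE B (Python) =====
-- from collections import defaultdict
--
--
-- def _search(s, x, right):
--     # classic bisect on a sorted list (no counting pass anywhere)
--     lo, hi = 0, len(s)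
--     while lo < hi:
--         mid = (lo + hi) // 2
--         if s[mid] < x or (right and s[mid] == x):
--             lo = mid + 1
--         else:
--             hi = mid
--     return lo
--
--
-- def reduce(moves):
--     s = sorted(moves)
--     reduced = defaultdict(int)
--     for north, south in (('n', 's'), ('ne', 'sw'), ('nw', 'se')):
--         value = (_search(s, north, True) - _search(s, north, False)) \
--               - (_search(s, south, True) - _search(s, south, False))
--         if value > 0:
--             reduced[north] = value
--     return reduced
-- ===== Notes on version B (the rewrite author's own statement) =====
-- stated objective: alternative
-- what changed: Replaced the hash-count (Counter) pass with sort-then-binary-search: moves are sorted once and each direction's multiplicity is read off as the width of its block, found by a hand-written bisect; no element-by-element counting loop remains.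
import Mathlib
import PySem

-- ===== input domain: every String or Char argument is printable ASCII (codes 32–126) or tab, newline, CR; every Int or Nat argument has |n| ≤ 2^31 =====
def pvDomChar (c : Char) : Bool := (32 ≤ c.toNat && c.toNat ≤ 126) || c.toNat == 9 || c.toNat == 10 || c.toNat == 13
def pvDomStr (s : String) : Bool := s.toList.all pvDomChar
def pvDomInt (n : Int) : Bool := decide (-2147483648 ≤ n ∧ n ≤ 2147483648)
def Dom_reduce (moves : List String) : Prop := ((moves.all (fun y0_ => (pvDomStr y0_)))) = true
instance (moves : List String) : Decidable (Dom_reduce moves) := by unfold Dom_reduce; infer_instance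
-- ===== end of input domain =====

-- B replaces A's Counter pass with sort-then-binary-search (each direction's multiplicity is the width of its block in the sorted list, located by a hand-written bisect); alternative decomposition, no speed claim.


-- ===== PORT A =====
-- oppossites = {'n': 's', 'ne': 'sw', 'nw': 'se'} as items list
def oppossites : List (String × String) := [("n", "s"), ("ne", "sw"), ("nw", "se")]

def reduce (moves : List String) : List (String × Int) :=
  let counts := PySem.Dict.counter moves
  let reduced : PySem.Dict String Int :=
    oppossites.foldl (fun d kv =>
      let value := counts.getD kv.1 0 - counts.getD kv.2 0
      if value > 0 then d.insert kv.1 value else d) PySem.Dict.empty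
  reduced.items

-- ===== PORT B =====
-- hand-written bisect of Source B; s[mid] is always in range (lo < hi ≤ len s at every probe), ported as getD
def pvSearchGo (s : List String) (x : String) (right : Bool) (lo hi : Nat) : Nat :=
  if h : lo < hi then
    let mid := (lo + hi) / 2
    if s.getD mid "" < x ∨ (right = true ∧ s.getD mid "" = x) then
      pvSearchGo s x right (mid + 1) hi
    else
      pvSearchGo s x right lo mid
  else lo
termination_by hi - lo
decreasing_by all_goals omega

def pvSearch (s : List String) (x : String) (right : Bool) : Nat :=
  pvSearchGo s x right 0 s.length

def reduce_alt (moves : List String) : List (String × Int) :=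
  let s := PySem.List.sorted moves (fun m => m) false
  let reduced : PySem.Dict String Int :=
    -- Source B's loop over the inline tuple (('n','s'), ('ne','sw'), ('nw','se'))
    [("n", "s"), ("ne", "sw"), ("nw", "se")].foldl (fun d kv =>
      let value : Int :=
        ((pvSearch s kv.1 true : Int) - (pvSearch s kv.1 false : Int))
          - ((pvSearch s kv.2 true : Int) - (pvSearch s kv.2 false : Int))
      if value > 0 then d.insert kv.1 value else d) PySem.Dict.empty
  reduced.items

-- ===== PRECONDITION & SPEC =====
def Spec_reduce (moves : List String) (out : List (String × Int)) : Prop := out = reduce_alt moves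
instance (moves : List String) (out : List (String × Int)) : Decidable (Spec_reduce moves out) := by unfold Spec_reduce; infer_instance

-- ===== CLAIM =====
def Claim_equal_reduce : Prop := ∀ (moves : List String), Dom_reduce moves → Spec_reduce moves (reduce moves)

-- ===== LEMMAS AND PROOFS =====

-- the predicate pvSearchGo's branch tests, on the probed element
def pvPred (x : String) (right : Bool) (y : String) : Bool :=
  if right then decide (y ≤ x) else decide (y < x)

lemma pvPred_iff (x : String) (right : Bool) (y : String) :
    (y < x ∨ (right = true ∧ y = x)) ↔ pvPred x right y = true := by
  cases right <;> simp [pvPred, le_iff_lt_or_eq]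

-- binary-search invariant: the returned index r has pvPred exactly below r
lemma pvSearchGo_props (s : List String) (x : String) (right : Bool)
    (hs : s.Pairwise (· ≤ ·)) :
    ∀ n lo hi, hi - lo = n → lo ≤ hi → hi ≤ s.length →
      (∀ j (hj : j < s.length), j < lo → pvPred x right s[j] = true) →
      (∀ j (hj : j < s.length), hi ≤ j → ¬ pvPred x right s[j] = true) →
      pvSearchGo s x right lo hi ≤ s.length ∧
      (∀ j (hj : j < s.length), j < pvSearchGo s x right lo hi → pvPred x right s[j] = true) ∧
      (∀ j (hj : j < s.length), pvSearchGo s x right lo hi ≤ j → ¬ pvPred x right s[j] = true) := by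
  intro n
  induction n using Nat.strong_induction_on with
  | _ n ih =>
    intro lo hi hn hle hhi hbelow habove
    rw [pvSearchGo]
    by_cases h : lo < hi
    · simp only [dif_pos h]
      have hmid : (lo + hi) / 2 < hi := by omega
      have hmidlo : lo ≤ (lo + hi) / 2 := by omega
      have hmlen : (lo + hi) / 2 < s.length := by omega
      have hget : s.getD ((lo + hi) / 2) "" = s[(lo + hi) / 2] := List.getD_eq_getElem s "" hmlen
      have hsorted : ∀ i j (hi1 : i < s.length) (hj1 : j < s.length), i ≤ j → s[i] ≤ s[j] := by
        intro i j hi1 hj1 hij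
        rcases Nat.eq_or_lt_of_le hij with rfl | hlt
        · exact le_refl _
        · exact List.pairwise_iff_getElem.mp hs i j hi1 hj1 hlt
      have hmono : ∀ i j (hi1 : i < s.length) (hj1 : j < s.length), i ≤ j →
          pvPred x right s[j] = true → pvPred x right s[i] = true := by
        intro i j hi1 hj1 hij hp
        have hij' := hsorted i j hi1 hj1 hij
        cases right
        · exact decide_eq_true (lt_of_le_of_lt hij' (of_decide_eq_true hp))
        · exact decide_eq_true (le_trans hij' (of_decide_eq_true hp))
      by_cases hc : s.getD ((lo + hi) / 2) "" < x ∨ (right = true ∧ s.getD ((lo + hi) / 2) "" = x)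
      · rw [if_pos hc]
        have hp : pvPred x right s[(lo + hi) / 2] = true :=
          (pvPred_iff x right _).mp (by rwa [hget] at hc)
        exact ih (hi - ((lo + hi) / 2 + 1)) (by omega) _ _ rfl (by omega) hhi
          (fun j hj hjlt => hmono j _ hj hmlen (by omega) hp)
          habove
      · rw [if_neg hc]
        have hp : ¬ pvPred x right s[(lo + hi) / 2] = true := fun hp =>
          hc (by rw [hget]; exact (pvPred_iff x right _).mpr hp)
        exact ih ((lo + hi) / 2 - lo) (by omega) _ _ rfl (by omega) (by omega) hbelow
          (fun j hj hjge hpj => hp (hmono _ j hmlen hj hjge hpj))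
    · simp only [dif_neg h]
      have : lo = hi := by omega
      subst this
      exact ⟨hhi, fun j hj hjlt => hbelow j hj hjlt, fun j hj hjge => habove j hj hjge⟩

-- a boundary index characterizes countP
lemma countP_eq_boundary (s : List String) (p : String → Bool) (r : Nat) (hr : r ≤ s.length)
    (h : ∀ j (hj : j < s.length), p s[j] = true ↔ j < r) : s.countP p = r := by
  induction s generalizing r with
  | nil => simp at hr ⊢; omega
  | cons a t iht =>
    rcases r with _ | r
    · have hnone : ∀ x ∈ a :: t, ¬ p x := by
        intro y hy hp
        rcases List.mem_iff_getElem.mp hy with ⟨j, hj, rfl⟩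
        exact absurd ((h j hj).mp hp) (by omega)
      rw [List.countP_eq_zero.mpr (by intro y hy; simpa using hnone y hy)]
    · have hpa : p a = true := (h 0 (by simp)).mpr (by omega)
      have ht := iht r (by simpa using hr) (fun j hj => by
        have := h (j + 1) (by simpa using Nat.succ_lt_succ hj)
        simpa [Nat.succ_lt_succ_iff] using this)
      simp [hpa, ht]

lemma pvSearch_countP (moves : List String) (x : String) (right : Bool) :
    pvSearch (PySem.List.sorted moves (fun m => m) false) x right
      = (PySem.List.sorted moves (fun m => m) false).countP (pvPred x right) := by
  set s := PySem.List.sorted moves (fun m => m) false with hsdef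
  have hs : s.Pairwise (· ≤ ·) := PySem.List.sorted_pairwise moves (fun m => m)
  obtain ⟨hr, hlt, hge⟩ := pvSearchGo_props s x right hs (s.length - 0) 0 s.length rfl
    (by omega) le_rfl (by omega) (by intro j hj hjge; omega)
  exact (countP_eq_boundary s _ _ hr (fun j hj =>
    ⟨fun hp => by by_contra hnot; exact (hge j hj (by omega)) hp,
     fun hjlt => hlt j hj hjlt⟩)).symm

-- countP(≤ x) - countP(< x) = count x, on any list
lemma countP_sub_eq_count (s : List String) (x : String) :
    (s.countP (pvPred x true) : Int) - s.countP (pvPred x false) = s.count x := by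
  induction s with
  | nil => simp
  | cons a t ih =>
    simp only [List.countP_cons, List.count_cons]
    by_cases hax : a = x
    · subst hax
      rw [show pvPred a true a = true from decide_eq_true le_rfl,
          show pvPred a false a = false from decide_eq_false (lt_irrefl a),
          show (a == a) = true from by simp]
      simp
      omega
    · have hfa : pvPred x true a = pvPred x false a := by
        show decide (a ≤ x) = decide (a < x)
        by_cases hlt : a < x
        · rw [decide_eq_true hlt, decide_eq_true (le_of_lt hlt)]
        · rw [decide_eq_false hlt, decide_eq_false (fun hle => hlt (lt_of_le_of_ne hle hax))]
      have hbeq : (a == x) = false := by simpa using hax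
      rw [hfa, hbeq]
      cases hc : pvPred x false a <;> simp <;> omega

lemma pvSearch_diff_eq_count (moves : List String) (x : String) :
    (pvSearch (PySem.List.sorted moves (fun m => m) false) x true : Int)
      - pvSearch (PySem.List.sorted moves (fun m => m) false) x false
      = moves.count x := by
  rw [pvSearch_countP, pvSearch_countP]
  have hperm : (PySem.List.sorted moves (fun m => m) false).Perm moves :=
    PySem.List.sorted_perm moves (fun m => m) false
  rw [← hperm.count_eq]
  exact countP_sub_eq_count (PySem.List.sorted moves (fun m => m) false) x

-- ===== VERDICT =====
theorem reduce_spec : Claim_equal_reduce := by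
  intro moves _
  unfold Spec_reduce reduce reduce_alt oppossites
  simp only [List.foldl_cons, List.foldl_nil, PySem.Dict.getD_counter,
    pvSearch_diff_eq_count]
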